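-- pv_equiv track=rewrite | github.com/jakedamico/n-queens-problem | queens.py | locateQueen
-- ===== SOURCE A (Python) =====
-- def locateQueen(board, queenNum):
--     queenCounter = 0
--     for i in range(len(board)):
--         for j in range(len(board[i])):
--             if board[i][j] == 1:
--                 queenCounter = queenCounter + 1
--                 if queenCounter == queenNum:
--                     return (int(str(i + 1) + str(j + 1)))
-- ===== SOURCE B (Python) =====
-- def locateQueen(board, queenNum):
--     # Two-phase: skip whole rows by their queen count, then pick the column by index.
--     if queenNum < 1:
--         return None
--     remaining = queenNum
--     for i, row in enumerate(board):
--         cols = [j for j, v in enumerate(row) if v == 1]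
--         if remaining <= len(cols):
--             j = cols[remaining - 1]
--             return int(str(i + 1) + str(j + 1))
--         remaining -= len(cols)
--     return None
-- ===== Notes on version B (the rewrite author's own statement) =====
-- stated objective: alternative
-- what changed: Replaces the cell-by-cell queen counter with interleaved early return by a two-phase row scan: each row's queen columns are collected at once, whole rows are skipped by their queen count, and the column is selected by direct index.
import Mathlib
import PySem

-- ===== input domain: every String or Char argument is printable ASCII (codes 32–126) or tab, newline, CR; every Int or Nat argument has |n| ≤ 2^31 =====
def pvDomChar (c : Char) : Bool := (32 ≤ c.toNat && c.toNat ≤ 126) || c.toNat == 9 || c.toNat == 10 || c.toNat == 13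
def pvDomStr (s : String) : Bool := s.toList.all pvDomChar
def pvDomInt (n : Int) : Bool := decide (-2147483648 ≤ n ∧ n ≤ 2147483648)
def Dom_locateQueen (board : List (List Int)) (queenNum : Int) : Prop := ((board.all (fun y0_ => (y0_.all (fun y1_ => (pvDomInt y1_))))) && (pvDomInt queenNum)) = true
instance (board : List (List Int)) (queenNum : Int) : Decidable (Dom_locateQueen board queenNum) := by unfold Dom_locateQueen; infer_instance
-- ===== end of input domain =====

-- B replaces A's cell-by-cell counter (early return when the counter hits queenNum) by a
-- two-phase row scan: collect each row's queen columns, skip whole rows by their count,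
-- then index the column directly — an alternative decomposition, not claimed faster.


-- ===== PORT A =====
-- inner loop 'for j in range(len(board[i]))': structural recursion over the row, j the running index
def pvARow (i j : Int) (row : List Int) (cnt qn : Int) : (Option Int) ⊕ Int :=
  match row with
  | [] => .inr cnt
  | v :: rest =>
    if v = 1 then
      if cnt + 1 = qn then
        .inl (PySem.Int.ofStr? (PySem.Int.toStr (i + 1) ++ PySem.Int.toStr (j + 1)))
      else pvARow i (j + 1) rest (cnt + 1) qn
    else pvARow i (j + 1) rest cnt qn

-- outer loop 'for i in range(len(board))': .inl = returned inside the row, .inr = counter after the row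
def pvABoard (i : Int) (rows : List (List Int)) (cnt qn : Int) : Option Int :=
  match rows with
  | [] => none
  | r :: rest =>
    match pvARow i 0 r cnt qn with
    | .inl res => res
    | .inr c => pvABoard (i + 1) rest c qn

def locateQueen (board : List (List Int)) (queenNum : Int) : Option Int :=
  pvABoard 0 board 0 queenNum

-- ===== PORT B =====
-- cols = [j for j, v in enumerate(row) if v == 1]
def pvBCols (row : List Int) : List Int :=
  ((PySem.List.enumerate row 0).filter (fun p => p.2 == 1)).map (fun p => p.1)

def pvBGo (i : Int) (rows : List (List Int)) (remaining : Int) : Option Int :=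
  match rows with
  | [] => none
  | row :: rest =>
    let cols := pvBCols row
    if remaining ≤ (cols.length : Int) then
      match PySem.List.pyGet? cols (remaining - 1) with
      | some j => PySem.Int.ofStr? (PySem.Int.toStr (i + 1) ++ PySem.Int.toStr (j + 1))
      | none => none   -- unreachable: 1 ≤ remaining ≤ len cols on every call from locateQueen_alt
    else pvBGo (i + 1) rest (remaining - cols.length)

def locateQueen_alt (board : List (List Int)) (queenNum : Int) : Option Int :=
  if queenNum < 1 then none else pvBGo 0 board queenNum

-- ===== PRECONDITION & SPEC =====
def Spec_locateQueen (board : List (List Int)) (queenNum : Int) (out : Option Int) : Prop := out = locateQueen_alt board queenNum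
instance (board : List (List Int)) (queenNum : Int) (out : Option Int) : Decidable (Spec_locateQueen board queenNum out) := by unfold Spec_locateQueen; infer_instance

-- ===== CLAIM (what is proved, stated in full; the proofs are below) =====
def Claim_equal_locateQueen : Prop := ∀ (board : List (List Int)) (queenNum : Int), Dom_locateQueen board queenNum → Spec_locateQueen board queenNum (locateQueen board queenNum)

-- ===== LEMMAS AND PROOFS =====

theorem pvEnumerate_shift {α : Type} (xs : List α) (s : Int) :
    PySem.List.enumerate xs (s + 1) = (PySem.List.enumerate xs s).map (fun p => (p.1 + 1, p.2)) := by
  induction xs generalizing s with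
  | nil => simp [PySem.List.enumerate_nil]
  | cons x xs ih => simp [PySem.List.enumerate_cons, ih]

theorem pvBCols_cons (v : Int) (rest : List Int) :
    pvBCols (v :: rest) =
      (if v = 1 then [(0 : Int)] else []) ++ (pvBCols rest).map (· + 1) := by
  simp only [pvBCols, PySem.List.enumerate_cons, List.filter_cons]
  rw [show (0 : Int) + 1 = 0 + 1 by ring, pvEnumerate_shift]
  by_cases hv : v = 1 <;>
    simp [hv, List.filter_map, List.map_map, Function.comp_def]

theorem pvARow_spec (row : List Int) (i j cnt qn : Int) (h : cnt < qn) :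
    pvARow i j row cnt qn =
      match (pvBCols row)[(qn - cnt - 1).toNat]? with
      | some c => .inl (PySem.Int.ofStr? (PySem.Int.toStr (i + 1) ++ PySem.Int.toStr (j + c + 1)))
      | none => .inr (cnt + (pvBCols row).length) := by
  induction row generalizing j cnt with
  | nil => simp [pvARow, pvBCols]
  | cons v rest ih =>
    rw [pvBCols_cons]
    by_cases hv : v = 1
    · by_cases hq : cnt + 1 = qn
      · have h0 : (qn - cnt - 1).toNat = 0 := by omega
        simp [pvARow, hv, hq, h0]
      · have h1 : cnt + 1 < qn := by omega
        have hsub : (qn - cnt - 1).toNat = (qn - (cnt + 1) - 1).toNat + 1 := by omega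
        rw [pvARow]
        simp only [hv, if_true, hq, if_false, ih (j + 1) (cnt + 1) h1, hsub]
        simp only [List.singleton_append, List.getElem?_cons_succ, List.getElem?_map]
        cases (pvBCols rest)[(qn - (cnt + 1) - 1).toNat]? with
        | none => simp; omega
        | some c => simp; ring_nf
    · rw [pvARow]
      simp only [hv, if_false, ih (j + 1) cnt h]
      simp only [List.nil_append, List.getElem?_map]
      cases (pvBCols rest)[(qn - cnt - 1).toNat]? with
      | none => simp
      | some c => simp; ring_nf

theorem pvARow_done (row : List Int) (i j cnt qn : Int) (h : qn ≤ cnt) :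
    pvARow i j row cnt qn = .inr (cnt + (pvBCols row).length) := by
  induction row generalizing j cnt with
  | nil => simp [pvARow, pvBCols]
  | cons v rest ih =>
    rw [pvBCols_cons]
    by_cases hv : v = 1
    · have hq : ¬ cnt + 1 = qn := by omega
      rw [pvARow]
      simp only [hv, if_true, hq, if_false, ih (j + 1) (cnt + 1) (by omega)]
      simp
      omega
    · rw [pvARow]
      simp only [hv, if_false, ih (j + 1) cnt h]
      simp

theorem pvABoard_done (rows : List (List Int)) (i cnt qn : Int) (h : qn ≤ cnt) :
    pvABoard i rows cnt qn = none := by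
  induction rows generalizing i cnt with
  | nil => rfl
  | cons r rest ih =>
    rw [pvABoard, pvARow_done r i 0 cnt qn h]
    exact ih (i + 1) _ (by have hl : (0:Int) ≤ ((pvBCols r).length : Int) := Int.natCast_nonneg _; omega)

theorem pvABoard_eq_pvBGo (rows : List (List Int)) (i cnt qn : Int) (h : cnt < qn) :
    pvABoard i rows cnt qn = pvBGo i rows (qn - cnt) := by
  induction rows generalizing i cnt with
  | nil => rfl
  | cons r rest ih =>
    rw [pvABoard, pvBGo, pvARow_spec r i 0 cnt qn h]
    by_cases hle : qn - cnt ≤ ((pvBCols r).length : Int)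
    · have hidx : (qn - cnt - 1).toNat < (pvBCols r).length := by omega
      have hget : PySem.List.pyGet? (pvBCols r) (qn - cnt - 1) = (pvBCols r)[(qn - cnt - 1).toNat]? :=
        PySem.List.pyGet?_of_nonneg _ (by omega)
      rw [List.getElem?_eq_getElem hidx]
      simp only [if_pos hle, hget, List.getElem?_eq_getElem hidx]
      simp
    · have hnone : (pvBCols r)[(qn - cnt - 1).toNat]? = none := by
        rw [List.getElem?_eq_none_iff]
        omega
      have h2 : cnt + (pvBCols r).length < qn := by omega
      rw [hnone]
      simp only [if_neg hle]
      rw [ih (i + 1) (cnt + (pvBCols r).length) h2]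
      congr 1
      omega

-- ===== VERDICT (by name: the statement is the Claim_ definition above) =====
theorem locateQueen_spec : Claim_equal_locateQueen := by
  intro board queenNum _
  unfold Spec_locateQueen locateQueen locateQueen_alt
  by_cases hq : queenNum < 1
  · rw [if_pos hq, pvABoard_done board 0 0 queenNum (by omega)]
  · rw [if_neg hq, pvABoard_eq_pvBGo board 0 0 queenNum (by omega)]
    norm_num
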